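-- pv_equiv track=rewrite | github.com/clan-lol/clan-core | docs/nix/render_options/__init__.py | split_options_by_root
-- ===== SOURCE A (Python) =====
-- from typing import Any
--
-- def split_options_by_root(options: dict[str, Any]) -> dict[str, dict[str, Any]]:
--     """
--     Split the flat dictionary of options into a dict of which each entry will construct complete option trees.
--     {
--         "a": { Data }
--         "a.b": { Data }
--         "c": { Data }
--     }
--     ->
--     {
--         "a": {
--             "a": { Data },
--             "a.b": { Data }
--         }
--         "c": {
--             "c": { Data }
--         }
--     }
--     """
--     res: dict[str, dict[str, Any]] = {}
--     for key, value in options.items():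
--         parts = key.split(".")
--         root = parts[0]
--         if root not in res:
--             res[root] = {}
--         res[root][key] = value
--     return res
-- ===== SOURCE B (Python) =====
-- def split_options_by_root(options):
--     """Two-pass grouping: dedup the root components, then build each group by filtering."""
--     roots = dict.fromkeys(k.split(".")[0] for k in options)
--     return {
--         r: {k: v for k, v in options.items() if k.split(".")[0] == r}
--         for r in roots
--     }
-- ===== Notes on version B (the rewrite author's own statement) =====
-- stated objective: alternative
-- what changed: Replaces A's single-pass hash-bucketing loop (create-bucket-if-missing, then in-place insert) by a two-pass grouping: first dedup the root components in order of first occurrence, then build each group with one filter pass over the items.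
import Mathlib
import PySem

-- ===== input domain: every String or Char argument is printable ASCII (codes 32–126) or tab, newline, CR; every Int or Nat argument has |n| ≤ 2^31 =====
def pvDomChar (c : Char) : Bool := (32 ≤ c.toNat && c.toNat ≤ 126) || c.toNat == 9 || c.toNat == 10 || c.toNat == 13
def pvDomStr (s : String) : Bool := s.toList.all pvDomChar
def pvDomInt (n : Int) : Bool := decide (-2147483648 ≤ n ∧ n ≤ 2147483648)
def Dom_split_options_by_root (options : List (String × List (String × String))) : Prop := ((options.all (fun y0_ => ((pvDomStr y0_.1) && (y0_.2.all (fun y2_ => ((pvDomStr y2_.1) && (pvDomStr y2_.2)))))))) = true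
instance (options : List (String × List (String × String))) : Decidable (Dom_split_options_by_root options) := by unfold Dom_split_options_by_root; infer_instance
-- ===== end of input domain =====

-- B replaces A's single-pass hash-bucketing loop by a two-pass grouping (dedup the roots,
-- then filter the items per root); alternative decomposition, same results, no speed claim.


-- ===== PORT A =====
-- key.split(".")[0]: split? is `some` because the separator "." is nonempty, and Python's
-- split always yields a nonempty list, so index 0 exists; the two defaults are never used.
def pvRoot (key : String) : String := ((PySem.Str.split? key ".").getD []).headD ""

-- Python dict assignment d[k] = v on an association list: overwrite in place, new keys append (exact).
def pvDictInsert {V : Type} (d : List (String × V)) (k : String) (v : V) : List (String × V) :=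
  match d with
  | [] => [(k, v)]
  | (k', v') :: rest => if k' == k then (k', v) :: rest else (k', v') :: pvDictInsert rest k v

-- Apply f to the value of the (unique) entry with key k, exact for 'res[root][key] = value'.
def pvDictModify {V : Type} (d : List (String × V)) (k : String) (f : V → V) : List (String × V) :=
  match d with
  | [] => []
  | (k', v') :: rest => if k' == k then (k', f v') :: rest else (k', v') :: pvDictModify rest k f

-- one iteration of A's loop body
def pvStepA (res : List (String × List (String × List (String × String))))
    (kv : String × List (String × String)) : List (String × List (String × List (String × String))) :=
  pvDictModify
    (if res.any (fun p => p.1 == pvRoot kv.1) then res else res ++ [(pvRoot kv.1, [])])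
    (pvRoot kv.1) (fun inner => pvDictInsert inner kv.1 kv.2)

def split_options_by_root (options : List (String × List (String × String))) :
    List (String × List (String × List (String × String))) :=
  options.foldl pvStepA []

-- ===== PORT B =====
def split_options_by_root_alt (options : List (String × List (String × String))) :
    List (String × List (String × List (String × String))) :=
  let roots := PySem.List.dedup (options.map (fun kv => pvRoot kv.1))
  roots.map (fun r => (r, options.filter (fun kv => pvRoot kv.1 == r)))

-- ===== PRECONDITION & SPEC =====
-- Pre_ excludes association lists with a repeated key: such a list does not represent a
-- Python dict (A's parameter type is dict), so A's overwrite-in-place behaviour there is accidental.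
def Pre_split_options_by_root (options : List (String × List (String × String))) : Prop :=
  (options.map Prod.fst).Nodup
instance (options : List (String × List (String × String))) : Decidable (Pre_split_options_by_root options) := by unfold Pre_split_options_by_root; infer_instance

def pvWitness_split_options_by_root : (List (String × List (String × String))) :=
  [("a.b", [("x", "1")]), ("a", []), ("c", [("y", "2")])]

def Spec_split_options_by_root (options : List (String × List (String × String))) (out : List (String × List (String × List (String × String)))) : Prop := out = split_options_by_root_alt options
instance (options : List (String × List (String × String))) (out : List (String × List (String × List (String × String)))) : Decidable (Spec_split_options_by_root options out) := by unfold Spec_split_options_by_root; infer_instance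

-- ===== CLAIM (what is proved, stated in full; the proofs are below) =====
def Claim_equal_split_options_by_root : Prop := ∀ (options : List (String × List (String × String))), Dom_split_options_by_root options → Pre_split_options_by_root options → Spec_split_options_by_root options (split_options_by_root options)

-- ===== LEMMAS AND PROOFS =====

-- inserting a fresh key appends
lemma pvDictInsert_append {V : Type} (d : List (String × V)) (k : String) (v : V)
    (h : ∀ p ∈ d, p.1 ≠ k) : pvDictInsert d k v = d ++ [(k, v)] := by
  induction d with
  | nil => rfl
  | cons p rest ih =>
    obtain ⟨k', v'⟩ := p
    have hk : k' ≠ k := h (k', v') (by simp)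
    simp [pvDictInsert, hk, ih (fun q hq => h q (by simp [hq]))]

-- modify on a keyed map over a duplicate-free key list hits exactly the matching entry
lemma pvDictModify_map {V : Type} (roots : List String) (g : String → V) (root : String)
    (f : V → V) (h : roots.Nodup) :
    pvDictModify (roots.map fun r => (r, g r)) root f
      = roots.map (fun r => (r, if r = root then f (g r) else g r)) := by
  induction roots with
  | nil => rfl
  | cons r rs ih =>
    have hnd := (List.nodup_cons.mp h)
    by_cases hr : r = root
    · subst hr
      simp only [List.map_cons, pvDictModify, beq_self_eq_true, if_true]
      refine congrArg _ ?_
      apply List.map_congr_left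
      intro a ha
      have : a ≠ r := fun he => hnd.1 (he ▸ ha)
      simp [this]
    · simp only [List.map_cons, pvDictModify]
      rw [if_neg (by simpa using hr), if_neg hr, ih hnd.2]

-- membership test over the keyed map is membership in the key list
lemma pvAny_map {V : Type} (roots : List String) (g : String → V) (root : String) :
    ((roots.map fun r => (r, g r)).any (fun p => p.1 == root)) = roots.contains root := by
  induction roots with
  | nil => rfl
  | cons r rs ih =>
    simp only [List.map_cons, List.any_cons, ih, List.contains_cons]
    rw [BEq.comm]

-- A's loop invariant: after processing l (with duplicate-free keys) the accumulator is
-- exactly B's grouped map of l.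
lemma pvMain (l : List (String × List (String × String))) (h : (l.map Prod.fst).Nodup) :
    l.foldl pvStepA []
      = (PySem.List.dedup (l.map (fun kv => pvRoot kv.1))).map
          (fun r => (r, l.filter (fun kv => pvRoot kv.1 == r))) := by
  induction l using List.reverseRecOn with
  | nil => rfl
  | append_singleton l x ih =>
    have hmap : ((l ++ [x]).map Prod.fst) = l.map Prod.fst ++ [x.1] := by simp
    rw [hmap] at h
    have hnd : (l.map Prod.fst).Nodup := (List.nodup_append.mp h).1
    have hfresh : x.1 ∉ l.map Prod.fst := fun hm =>
      List.disjoint_of_nodup_append h hm (by simp)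
    have hdedup : PySem.List.dedup ((l ++ [x]).map (fun kv => pvRoot kv.1))
        = PySem.Set.add (PySem.List.dedup (l.map (fun kv => pvRoot kv.1))) (pvRoot x.1) := by
      simp only [PySem.List.dedup_eq_ofList, PySem.Set.ofList, List.map_append,
        List.foldl_append, List.map_cons, List.map_nil, List.foldl_cons, List.foldl_nil]
    have hrootsnd : (PySem.List.dedup (l.map (fun kv => pvRoot kv.1))).Nodup :=
      PySem.List.nodup_dedup _
    have hfilter : ∀ r : String, (l ++ [x]).filter (fun kv => pvRoot kv.1 == r)
        = l.filter (fun kv => pvRoot kv.1 == r) ++ (if pvRoot x.1 = r then [x] else []) := by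
      intro r
      rw [List.filter_append]
      by_cases hr : pvRoot x.1 = r <;> simp [hr]
    have hkeyfresh : ∀ r : String, ∀ p ∈ l.filter (fun kv => pvRoot kv.1 == r), p.1 ≠ x.1 := by
      intro r p hp he
      exact hfresh (he ▸ List.mem_map_of_mem (List.mem_of_mem_filter hp))
    rw [List.foldl_append, List.foldl_cons, List.foldl_nil, ih hnd, hdedup]
    unfold pvStepA
    rw [pvAny_map]
    by_cases hmem : pvRoot x.1 ∈ PySem.List.dedup (l.map (fun kv => pvRoot kv.1))
    · have hcL : (PySem.List.dedup (l.map (fun kv => pvRoot kv.1))).contains (pvRoot x.1) = true :=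
        List.elem_eq_true_of_mem hmem
      have hcS : PySem.Set.contains (PySem.List.dedup (l.map (fun kv => pvRoot kv.1))) (pvRoot x.1) = true :=
        (PySem.Set.contains_iff _ _).mpr hmem
      have hadd : PySem.Set.add (PySem.List.dedup (l.map (fun kv => pvRoot kv.1))) (pvRoot x.1)
          = PySem.List.dedup (l.map (fun kv => pvRoot kv.1)) := by
        unfold PySem.Set.add
        rw [if_pos hcS]
      rw [if_pos hcL, hadd, pvDictModify_map _ _ _ _ hrootsnd]
      apply List.map_congr_left
      intro r hr
      by_cases hreq : r = pvRoot x.1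
      · rw [if_pos hreq, hfilter r, if_pos hreq.symm, pvDictInsert_append _ _ _ (hkeyfresh r)]
      · rw [if_neg hreq, hfilter r, if_neg (fun he : pvRoot x.1 = r => hreq he.symm), List.append_nil]
    · have hcL : (PySem.List.dedup (l.map (fun kv => pvRoot kv.1))).contains (pvRoot x.1) = false := by
        rw [Bool.eq_false_iff]
        exact fun hct => hmem (List.mem_of_elem_eq_true hct)
      have hcS : PySem.Set.contains (PySem.List.dedup (l.map (fun kv => pvRoot kv.1))) (pvRoot x.1) = false := by
        rw [Bool.eq_false_iff]
        exact fun hct => hmem ((PySem.Set.contains_iff _ _).mp hct)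
      have hadd : PySem.Set.add (PySem.List.dedup (l.map (fun kv => pvRoot kv.1))) (pvRoot x.1)
          = PySem.List.dedup (l.map (fun kv => pvRoot kv.1)) ++ [pvRoot x.1] := by
        unfold PySem.Set.add
        rw [hcS]
        rfl
      have hempty : l.filter (fun kv => pvRoot kv.1 == pvRoot x.1) = [] := by
        rw [List.filter_eq_nil_iff]
        intro kv hkv hb
        refine hmem ?_
        rw [PySem.List.mem_dedup, ← (by simpa using hb : pvRoot kv.1 = pvRoot x.1)]
        exact List.mem_map_of_mem hkv
      have hndapp : (PySem.List.dedup (l.map (fun kv => pvRoot kv.1)) ++ [pvRoot x.1]).Nodup := by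
        rw [List.nodup_append]
        refine ⟨hrootsnd, List.nodup_singleton _, ?_⟩
        intro a ha b hbm
        rw [List.mem_singleton] at hbm
        exact fun he => hmem ((he.trans hbm) ▸ ha)
      have hres' : ((PySem.List.dedup (l.map (fun kv => pvRoot kv.1))).map
            (fun r => (r, l.filter (fun kv => pvRoot kv.1 == r)))) ++ [(pvRoot x.1, [])]
          = (PySem.List.dedup (l.map (fun kv => pvRoot kv.1)) ++ [pvRoot x.1]).map
            (fun r => (r, l.filter (fun kv => pvRoot kv.1 == r))) := by
        simp [hempty]
      rw [if_neg (Bool.eq_false_iff.mp hcL), hadd, hres', pvDictModify_map _ _ _ _ hndapp]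
      apply List.map_congr_left
      intro r hr
      by_cases hreq : r = pvRoot x.1
      · rw [if_pos hreq, hfilter r, if_pos hreq.symm, hreq, hempty,
          pvDictInsert_append _ _ _ (by simp), List.nil_append]
      · rw [if_neg hreq, hfilter r, if_neg (fun he : pvRoot x.1 = r => hreq he.symm), List.append_nil]

-- ===== VERDICT (by name: the statement is the Claim_ definition above) =====
theorem split_options_by_root_spec : Claim_equal_split_options_by_root := by
  intro options _ hpre
  unfold Spec_split_options_by_root split_options_by_root split_options_by_root_alt
  exact pvMain options hpre
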